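-- pv_equiv track=rewrite | github.com/hautbli/algorithm | programmers_codingtest/level1/codingtest1_ex4.py | solution
-- ===== SOURCE A (Python) =====
-- def solution(array, commands):
--     answer = []
--
--     for commands_in in commands:
--         first = commands_in[0]
--         end = commands_in[1]
--         return_idx = commands_in[2]
--
--         new_array = array[first - 1:end]
--         new_array.sort()
--         return_value = new_array[return_idx - 1]
--         answer.append(return_value)
--
--     return answer
-- ===== SOURCE B (Python) =====
-- def solution(array, commands):
--     # iterative quickselect per command (middle-element pivot) instead of a full sort
--     answer = []
--     for c in commands:
--         xs = array[c[0] - 1:c[1]]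
--         k = c[2]
--         while True:
--             pivot = xs[len(xs) // 2]
--             lo = [x for x in xs if x < pivot]
--             if k <= len(lo):
--                 xs = lo
--                 continue
--             n_le = len(lo) + sum(1 for x in xs if x == pivot)
--             if k <= n_le:
--                 answer.append(pivot)
--                 break
--             xs = [x for x in xs if x > pivot]
--             k -= n_le
--     return answer
-- ===== Notes on version B (the rewrite author's own statement) =====
-- stated objective: alternative
-- what changed: Replaces the full sort of each slice with an iterative quickselect (middle-element pivot, three-way partition) that finds the k-th smallest element directly.
-- outside the precondition, e.g. on solution([3, 1, 2], [[1, 3, 0]]): A returns [3], B raises IndexError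
import Mathlib
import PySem

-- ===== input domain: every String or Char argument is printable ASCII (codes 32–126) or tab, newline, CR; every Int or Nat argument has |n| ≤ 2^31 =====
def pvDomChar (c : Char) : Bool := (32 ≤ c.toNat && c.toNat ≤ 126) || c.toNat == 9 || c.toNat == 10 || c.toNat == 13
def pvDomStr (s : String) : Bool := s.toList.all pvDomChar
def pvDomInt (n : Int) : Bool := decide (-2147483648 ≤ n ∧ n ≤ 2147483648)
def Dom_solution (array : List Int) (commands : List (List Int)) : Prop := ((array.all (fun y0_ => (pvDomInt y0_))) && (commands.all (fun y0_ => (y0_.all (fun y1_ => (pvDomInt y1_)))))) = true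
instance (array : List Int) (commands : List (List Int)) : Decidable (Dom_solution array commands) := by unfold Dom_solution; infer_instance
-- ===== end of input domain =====

-- B replaces the per-command full sort with an iterative quickselect (middle pivot, three-way partition); return-value equivalence only.

-- ===== PORT A =====
def solution (array : List Int) (commands : List (List Int)) : List Int :=
  commands.foldl (fun answer c =>
    let first := PySem.List.pyGetD c 0 0
    let endIdx := PySem.List.pyGetD c 1 0
    let returnIdx := PySem.List.pyGetD c 2 0
    let newArray := PySem.List.sorted (PySem.List.slice array (some (first - 1)) (some endIdx)) (fun x => x) false
    answer ++ [PySem.List.pyGetD newArray (returnIdx - 1) 0]) []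

-- ===== PORT B =====
-- the 'while True' selection loop of Source B, with a fuel argument only to make the recursion structural
-- (each iteration strictly shrinks xs, so the fuel |xs| + 1 supplied at the call site never runs out);
-- 'none' = the IndexError of xs[len(xs)//2] on empty xs
def quickselect : Nat → List Int → Int → Option Int
  | 0, _, _ => none
  | fuel + 1, xs, k =>
    if xs = [] then none
    else
      let pivot := xs.getD (xs.length / 2) 0   -- index len//2 is in range for nonempty xs
      let lo := xs.filter (fun x => x < pivot)
      if k ≤ (lo.length : Int) then quickselect fuel lo k
      else
        let nle := (lo.length : Int) + ((xs.filter (fun x => x = pivot)).length : Int)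
        if k ≤ nle then some pivot
        else quickselect fuel (xs.filter (fun x => pivot < x)) (k - nle)

def solution_alt (array : List Int) (commands : List (List Int)) : List Int :=
  commands.foldl (fun answer c =>
    let xs := PySem.List.slice array (some (PySem.List.pyGetD c 0 0 - 1)) (some (PySem.List.pyGetD c 1 0))
    match quickselect (xs.length + 1) xs (PySem.List.pyGetD c 2 0) with
    | some v => answer ++ [v]
    | none => answer) []   -- none = Source B raises IndexError there; unreachable under Pre_

-- ===== PRECONDITION & SPEC =====
-- Pre_ excludes commands with fewer than three entries or a rank above the slice length (A raises IndexError there),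
-- and commands with rank < 1, where A's returned value is an accidental Python negative-index wraparound and B raises IndexError.
def Pre_solution (array : List Int) (commands : List (List Int)) : Prop :=
  ∀ c ∈ commands, 3 ≤ c.length ∧ 1 ≤ PySem.List.pyGetD c 2 0 ∧
    PySem.List.pyGetD c 2 0 ≤ ((PySem.List.slice array (some (PySem.List.pyGetD c 0 0 - 1)) (some (PySem.List.pyGetD c 1 0))).length : Int)
instance (array : List Int) (commands : List (List Int)) : Decidable (Pre_solution array commands) := by unfold Pre_solution; infer_instance

def pvWitness_solution : List Int × List (List Int) := ([3, 1, 2, 5], [[1, 3, 2], [2, 4, 1]])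

def Spec_solution (array : List Int) (commands : List (List Int)) (out : List Int) : Prop := out = solution_alt array commands
instance (array : List Int) (commands : List (List Int)) (out : List Int) : Decidable (Spec_solution array commands out) := by unfold Spec_solution; infer_instance

-- ===== CLAIM (what is proved, stated in full; the proofs are below) =====
def Claim_equal_solution : Prop := ∀ (array : List Int) (commands : List (List Int)), Dom_solution array commands → Pre_solution array commands → Spec_solution array commands (solution array commands)

-- ===== LEMMAS AND PROOFS =====

theorem pivot_mem (xs : List Int) (hxs : ¬ xs = []) : xs.getD (xs.length / 2) 0 ∈ xs := by
  have h : xs.length / 2 < xs.length := Nat.div_lt_self (List.length_pos_iff.mpr hxs) one_lt_two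
  rw [List.getD_eq_getElem _ _ h]; exact List.getElem_mem h

theorem filter_lt_length_lt (xs : List Int) (hxs : ¬ xs = []) :
    (xs.filter (fun x => x < xs.getD (xs.length / 2) 0)).length < xs.length := by
  refine lt_of_le_of_ne (List.length_filter_le _ _) (fun h => ?_)
  have hm := List.length_filter_eq_length_iff.mp h _ (pivot_mem xs hxs)
  simp at hm

theorem filter_gt_length_lt (xs : List Int) (hxs : ¬ xs = []) :
    (xs.filter (fun x => xs.getD (xs.length / 2) 0 < x)).length < xs.length := by
  refine lt_of_le_of_ne (List.length_filter_le _ _) (fun h => ?_)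
  have hm := List.length_filter_eq_length_iff.mp h _ (pivot_mem xs hxs)
  simp at hm

theorem filter_partition_perm (xs : List Int) (p : Int) :
    (xs.filter (fun x => x < p) ++ (xs.filter (fun x => x = p) ++ xs.filter (fun x => p < x))).Perm xs := by
  induction xs with
  | nil => simp
  | cons a t ih =>
    rcases lt_trichotomy a p with h | h | h
    · simp only [List.filter_cons, decide_eq_true_eq, if_pos h, if_neg (by omega : ¬ a = p),
        if_neg (by omega : ¬ p < a), List.cons_append]
      exact ih.cons a
    · simp only [List.filter_cons, decide_eq_true_eq, if_neg (by omega : ¬ a < p), if_pos h,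
        if_neg (by omega : ¬ p < a), List.cons_append]
      exact List.perm_middle.trans (ih.cons a)
    · simp only [List.filter_cons, decide_eq_true_eq, if_neg (by omega : ¬ a < p),
        if_neg (by omega : ¬ a = p), if_pos h]
      exact (((List.perm_middle).append_left _).trans List.perm_middle).trans (ih.cons a)

theorem pairwise_le_of_const (l : List Int) (p : Int) (h : ∀ x ∈ l, x = p) :
    l.Pairwise (· ≤ ·) := by
  induction l with
  | nil => exact List.Pairwise.nil
  | cons a t ih =>
    refine List.Pairwise.cons (fun b hb => ?_) (ih (fun x hx => h x (List.mem_cons_of_mem a hx)))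
    rw [h a List.mem_cons_self, h b (List.mem_cons_of_mem a hb)]

-- sorted(xs) is sorted(lo) ++ eq ++ sorted(hi) for the three-way partition at any pivot
theorem sorted_partition (xs : List Int) (p : Int) :
    PySem.List.sorted xs (fun x => x) false =
      PySem.List.sorted (xs.filter (fun x => x < p)) (fun x => x) false ++
        (xs.filter (fun x => x = p) ++
          PySem.List.sorted (xs.filter (fun x => p < x)) (fun x => x) false) := by
  refine PySem.List.sorted_id_eq_of_perm_of_pairwise _ _ ?_ ?_
  · exact ((PySem.List.sorted_perm _ _ _).append
      ((PySem.List.sorted_perm _ _ _).append_left _)).trans (filter_partition_perm xs p)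
  · have hlo : ∀ x ∈ PySem.List.sorted (xs.filter (fun x => x < p)) (fun x => x) false, x < p := by
      intro x hx
      have hm := ((PySem.List.sorted_perm _ _ _).mem_iff).mp hx
      simpa using (List.mem_filter.mp hm).2
    have heq : ∀ x ∈ xs.filter (fun x => x = p), x = p := by
      intro x hx; simpa using (List.mem_filter.mp hx).2
    have hhi : ∀ x ∈ PySem.List.sorted (xs.filter (fun x => p < x)) (fun x => x) false, p < x := by
      intro x hx
      have hm := ((PySem.List.sorted_perm _ _ _).mem_iff).mp hx
      simpa using (List.mem_filter.mp hm).2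
    rw [List.pairwise_append]
    refine ⟨by simpa using PySem.List.sorted_pairwise (xs.filter (fun x => x < p)) (fun x => x), ?_, ?_⟩
    · rw [List.pairwise_append]
      refine ⟨pairwise_le_of_const _ p heq,
        by simpa using PySem.List.sorted_pairwise (xs.filter (fun x => p < x)) (fun x => x), ?_⟩
      intro a ha b hb
      exact le_of_lt ((heq a ha) ▸ hhi b hb)
    · intro a ha b hb
      rcases List.mem_append.mp hb with hb | hb
      · exact le_of_lt ((heq b hb) ▸ hlo a ha)
      · exact le_of_lt (lt_trans (hlo a ha) (hhi b hb))

-- quickselect computes the k-th smallest, i.e. sorted(xs)[k-1], whenever 1 ≤ k ≤ |xs| and the fuel suffices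
theorem quickselect_eq_sorted (fuel : Nat) : ∀ (xs : List Int) (k : Int), xs.length < fuel →
    1 ≤ k → k ≤ (xs.length : Int) →
    quickselect fuel xs k = (PySem.List.sorted xs (fun x => x) false)[(k - 1).toNat]? := by
  induction fuel with
  | zero => intro xs k h _ _; omega
  | succ fuel ih =>
    intro xs k hfuel hk1 hk2
    have hxs : ¬ xs = [] := by
      intro h; rw [h] at hk2; simp at hk2; omega
    rw [quickselect, if_neg hxs]
    show (if k ≤ ((xs.filter (fun x => x < xs.getD (xs.length / 2) 0)).length : Int) then
            quickselect fuel (xs.filter (fun x => x < xs.getD (xs.length / 2) 0)) k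
          else if k ≤ ((xs.filter (fun x => x < xs.getD (xs.length / 2) 0)).length : Int) +
              ((xs.filter (fun x => x = xs.getD (xs.length / 2) 0)).length : Int) then
            some (xs.getD (xs.length / 2) 0)
          else
            quickselect fuel (xs.filter (fun x => xs.getD (xs.length / 2) 0 < x))
              (k - (((xs.filter (fun x => x < xs.getD (xs.length / 2) 0)).length : Int) +
                ((xs.filter (fun x => x = xs.getD (xs.length / 2) 0)).length : Int))))
        = (PySem.List.sorted xs (fun x => x) false)[(k - 1).toNat]?
    set p := xs.getD (xs.length / 2) 0 with hp
    set lo := xs.filter (fun x => x < p) with hlo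
    set eqs := xs.filter (fun x => x = p) with heqs
    set hi := xs.filter (fun x => p < x) with hhi
    have hS := sorted_partition xs p
    rw [← hlo, ← heqs, ← hhi] at hS
    have hlen := (filter_partition_perm xs p).length_eq
    simp only [List.length_append] at hlen
    rw [← hlo, ← heqs, ← hhi] at hlen
    by_cases h1 : k ≤ (lo.length : Int)
    · rw [if_pos h1]
      have hrec := ih lo k (by have := filter_lt_length_lt xs hxs; rw [← hp, ← hlo] at this; omega) hk1 h1
      rw [hrec, hS]
      rw [List.getElem?_append_left (by rw [PySem.List.length_sorted]; omega)]
    · rw [if_neg h1]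
      by_cases h2 : k ≤ (lo.length : Int) + (eqs.length : Int)
      · rw [if_pos h2, hS]
        rw [List.getElem?_append_right (by rw [PySem.List.length_sorted]; omega)]
        rw [List.getElem?_append_left (by rw [PySem.List.length_sorted]; omega)]
        have hj : (k - 1).toNat - (PySem.List.sorted lo (fun x => x) false).length < eqs.length := by
          rw [PySem.List.length_sorted]; omega
        rw [List.getElem?_eq_getElem hj]
        have hmem := List.getElem_mem hj
        have hv : ∀ x ∈ eqs, x = p := fun x hx => by
          rw [heqs] at hx; simpa using (List.mem_filter.mp hx).2
        rw [hv _ hmem]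
      · rw [if_neg h2]
        have hk1' : 1 ≤ k - ((lo.length : Int) + (eqs.length : Int)) := by omega
        have hk2' : k - ((lo.length : Int) + (eqs.length : Int)) ≤ (hi.length : Int) := by omega
        have hrec := ih hi (k - ((lo.length : Int) + (eqs.length : Int)))
          (by have := filter_gt_length_lt xs hxs; rw [← hp, ← hhi] at this; omega) hk1' hk2'
        rw [hrec, hS]
        rw [List.getElem?_append_right (by rw [PySem.List.length_sorted]; omega)]
        rw [List.getElem?_append_right (by rw [PySem.List.length_sorted]; omega)]
        have hidx : ((k - ((lo.length : Int) + (eqs.length : Int)) - 1).toNat)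
            = (k - 1).toNat - (PySem.List.sorted lo (fun x => x) false).length - eqs.length := by
          rw [PySem.List.length_sorted]; omega
        rw [hidx]

-- one command: B's quickselect equals A's sorted-slice lookup
theorem step_value_eq (array c : List Int)
    (h1 : 1 ≤ PySem.List.pyGetD c 2 0)
    (h2 : PySem.List.pyGetD c 2 0 ≤ ((PySem.List.slice array (some (PySem.List.pyGetD c 0 0 - 1)) (some (PySem.List.pyGetD c 1 0))).length : Int)) :
    quickselect ((PySem.List.slice array (some (PySem.List.pyGetD c 0 0 - 1)) (some (PySem.List.pyGetD c 1 0))).length + 1)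
        (PySem.List.slice array (some (PySem.List.pyGetD c 0 0 - 1)) (some (PySem.List.pyGetD c 1 0)))
        (PySem.List.pyGetD c 2 0)
      = some (PySem.List.pyGetD
          (PySem.List.sorted (PySem.List.slice array (some (PySem.List.pyGetD c 0 0 - 1)) (some (PySem.List.pyGetD c 1 0))) (fun x => x) false)
          (PySem.List.pyGetD c 2 0 - 1) 0) := by
  have hlt : (PySem.List.pyGetD c 2 0 - 1).toNat <
      (PySem.List.sorted (PySem.List.slice array (some (PySem.List.pyGetD c 0 0 - 1)) (some (PySem.List.pyGetD c 1 0))) (fun x => x) false).length := by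
    rw [PySem.List.length_sorted]; omega
  rw [quickselect_eq_sorted _ _ _ (by omega) h1 h2]
  rw [List.getElem?_eq_getElem hlt]
  have hcast : PySem.List.pyGetD c 2 0 - 1 = (((PySem.List.pyGetD c 2 0 - 1).toNat : Nat) : Int) := by omega
  conv_rhs => rw [hcast, PySem.List.pyGetD_natCast]
  rw [List.getD_eq_getElem _ _ hlt]

theorem foldl_congr_mem' {α β : Type} (xs : List β) (f g : α → β → α) :
    ∀ (init : α), (∀ (acc : α) (c : β), c ∈ xs → f acc c = g acc c) →
      xs.foldl f init = xs.foldl g init := by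
  induction xs with
  | nil => intro _ _; rfl
  | cons c t ih =>
    intro init h
    rw [List.foldl_cons, List.foldl_cons, h init c List.mem_cons_self]
    exact ih _ (fun a d hd => h a d (List.mem_cons_of_mem c hd))

-- ===== VERDICT (by name: the statement is the Claim_ definition above) =====
theorem solution_spec : Claim_equal_solution := by
  intro array commands _ hpre
  unfold Spec_solution solution solution_alt
  refine foldl_congr_mem' commands _ _ [] ?_
  intro acc c hc
  have hcpre := hpre c hc
  show acc ++ [PySem.List.pyGetD
      (PySem.List.sorted (PySem.List.slice array (some (PySem.List.pyGetD c 0 0 - 1)) (some (PySem.List.pyGetD c 1 0))) (fun x => x) false)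
      (PySem.List.pyGetD c 2 0 - 1) 0]
    = match quickselect ((PySem.List.slice array (some (PySem.List.pyGetD c 0 0 - 1)) (some (PySem.List.pyGetD c 1 0))).length + 1)
        (PySem.List.slice array (some (PySem.List.pyGetD c 0 0 - 1)) (some (PySem.List.pyGetD c 1 0)))
        (PySem.List.pyGetD c 2 0) with
      | some v => acc ++ [v]
      | none => acc
  rw [step_value_eq array c hcpre.2.1 hcpre.2.2]
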